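-- pv_equiv track=rewrite | github.com/srillaert/binary-puzzles | solve.py | maximum_two
-- ===== SOURCE A (Python) =====
-- def maximum_two(line):
-- 	previous = ""
-- 	for char in line:
-- 		count = count + 1 if char == previous else 1
-- 		if count > 2:
-- 			return False
-- 		previous = char
-- 	return True
-- ===== SOURCE B (Python) =====
-- def maximum_two(line):
--     return all(ch * 3 not in line for ch in set(line))
-- ===== Notes on version B (the rewrite author's own statement) =====
-- stated objective: alternative
-- what changed: B checks, for each distinct character ch of the line, that the substring ch*3 does not occur in the line (substring searches over the distinct alphabet), instead of A's stateful previous/count scan with early return.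
import Mathlib
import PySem

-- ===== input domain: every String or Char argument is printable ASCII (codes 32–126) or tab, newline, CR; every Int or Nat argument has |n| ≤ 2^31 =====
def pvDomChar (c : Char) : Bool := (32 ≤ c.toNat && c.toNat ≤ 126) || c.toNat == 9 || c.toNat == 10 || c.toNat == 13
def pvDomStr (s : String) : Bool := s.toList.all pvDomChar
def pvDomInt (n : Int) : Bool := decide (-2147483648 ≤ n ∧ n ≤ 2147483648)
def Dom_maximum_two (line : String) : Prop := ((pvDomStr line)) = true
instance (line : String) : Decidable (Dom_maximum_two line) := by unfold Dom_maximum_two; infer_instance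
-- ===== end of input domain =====

-- B checks, for each distinct character ch of the line, that the substring ch*ch*ch does not
-- occur in the line, instead of A's stateful previous/count scan (objective: alternative).

-- ===== PORT A =====
-- previous starts as "" (matches no single character) → modelled as Option Char, none initially;
-- count is referenced only after the first iteration sets it, so the initial 0 is never used.
def pvGoA : List Char → Option Char → Int → Bool
  | [], _, _ => true
  | c :: rest, previous, count =>
    let count := if some c == previous then count + 1 else 1
    if count > 2 then false else pvGoA rest (some c) count

def maximum_two (line : String) : Bool := pvGoA line.toList none 0

-- ===== PORT B =====
-- Python 'p in s' substring containment, ported by hand (exact: prefix at each suffix).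
def pvIsSub (p : List Char) : List Char → Bool
  | [] => p.isEmpty
  | x :: t => p.isPrefixOf (x :: t) || pvIsSub p t

-- all(ch * 3 not in line for ch in set(line)); 'all' over a set is order-independent.
def maximum_two_alt (line : String) : Bool :=
  (PySem.Set.ofList line.toList).all (fun c => !(pvIsSub [c, c, c] line.toList))

-- ===== PRECONDITION & SPEC =====
def Spec_maximum_two (line : String) (out : Bool) : Prop := out = maximum_two_alt line
instance (line : String) (out : Bool) : Decidable (Spec_maximum_two line out) := by unfold Spec_maximum_two; infer_instance

-- ===== CLAIM (what is proved, stated in full; the proofs are below) =====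
def Claim_equal_maximum_two : Prop := ∀ (line : String), Dom_maximum_two line → Spec_maximum_two line (maximum_two line)

-- ===== LEMMAS AND PROOFS =====

-- middle predicate: some three consecutive equal characters
def pvHasTriple : List Char → Bool
  | x :: y :: z :: t => (x == y && y == z) || pvHasTriple (y :: z :: t)
  | _ => false

theorem pvHasTriple_mono (x : Char) (t : List Char) (h : pvHasTriple t = true) :
    pvHasTriple (x :: t) = true := by
  match t with
  | [] => simp [pvHasTriple] at h
  | [a] => simp [pvHasTriple] at h
  | [a, b] => simp [pvHasTriple] at h
  | a :: b :: c :: t' => simp [pvHasTriple] at h ⊢; right; exact h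

-- A equals the negation of pvHasTriple
theorem pvGoA_char (t : List Char) : ∀ c : Char,
    (pvGoA t (some c) 1 = !pvHasTriple (c :: t)) ∧ (pvGoA t (some c) 2 = !pvHasTriple (c :: c :: t)) := by
  induction t with
  | nil => intro c; constructor <;> simp [pvGoA, pvHasTriple]
  | cons x t ih =>
    intro c
    by_cases hxc : x = c
    · subst hxc
      refine ⟨?_, ?_⟩
      · show pvGoA (x :: t) (some x) 1 = !pvHasTriple (x :: x :: t)
        rw [← (ih x).2]
        simp [pvGoA]
      · show pvGoA (x :: t) (some x) 2 = !pvHasTriple (x :: x :: x :: t)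
        simp [pvGoA, pvHasTriple]
    · have h1 := (ih x).1
      have hcb : (c == x) = false := by simp [Ne.symm hxc]
      have drop : pvHasTriple (c :: x :: t) = pvHasTriple (x :: t) := by
        match t with
        | [] => simp [pvHasTriple]
        | z :: t' => simp [pvHasTriple, hcb]
      refine ⟨?_, ?_⟩
      · show pvGoA (x :: t) (some c) 1 = !pvHasTriple (c :: x :: t)
        rw [drop, ← h1]
        simp [pvGoA, hxc]
      · show pvGoA (x :: t) (some c) 2 = !pvHasTriple (c :: c :: x :: t)
        have e2 : pvHasTriple (c :: c :: x :: t) = pvHasTriple (c :: x :: t) := by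
          simp [pvHasTriple, hcb]
        rw [e2, drop, ← h1]
        simp [pvGoA, hxc]

theorem pvIsSub_of_triple (l : List Char) (h : pvHasTriple l = true) :
    ∃ c, c ∈ l ∧ pvIsSub [c, c, c] l = true := by
  induction l with
  | nil => simp [pvHasTriple] at h
  | cons x t ih =>
    match t, h with
    | [], h => simp [pvHasTriple] at h
    | [a], h => simp [pvHasTriple] at h
    | y :: z :: t', h =>
      simp only [pvHasTriple, Bool.or_eq_true, Bool.and_eq_true, beq_iff_eq] at h
      rcases h with ⟨h1, h2⟩ | h
      · subst h1; subst h2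
        exact ⟨x, by simp, by simp [pvIsSub, List.isPrefixOf]⟩
      · obtain ⟨c, hc, hs⟩ := ih h
        refine ⟨c, by simp [hc], ?_⟩
        rw [show pvIsSub [c, c, c] (x :: y :: z :: t') =
              (List.isPrefixOf [c, c, c] (x :: y :: z :: t') || pvIsSub [c, c, c] (y :: z :: t')) from rfl,
            hs, Bool.or_true]

theorem pvTriple_of_isSub (c : Char) (l : List Char) (h : pvIsSub [c, c, c] l = true) :
    pvHasTriple l = true := by
  induction l with
  | nil => simp [pvIsSub] at h
  | cons x t ih =>
    simp only [pvIsSub, Bool.or_eq_true] at h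
    rcases h with h | h
    · match t, h with
      | [], h => simp [List.isPrefixOf] at h
      | y :: t2, h =>
        match t2, h with
        | [], h => simp [List.isPrefixOf] at h
        | z :: t3, h =>
          simp only [List.isPrefixOf, Bool.and_eq_true, beq_iff_eq] at h
          obtain ⟨h1, h2, h3, _⟩ := h
          subst h1; subst h2; subst h3
          simp [pvHasTriple]
    · exact pvHasTriple_mono x t (ih h)

theorem pvAlt_char (l : List Char) :
    (PySem.Set.ofList l).all (fun c => !(pvIsSub [c, c, c] l)) = !pvHasTriple l := by
  by_cases h : pvHasTriple l = true
  · obtain ⟨c, hc, hs⟩ := pvIsSub_of_triple l h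
    have hmem : c ∈ PySem.Set.ofList l := by simp [PySem.Set.mem_ofList, hc]
    rw [h]
    simp only [Bool.not_true]
    rw [List.all_eq_false]
    exact ⟨c, hmem, by simp [hs]⟩
  · have h' : pvHasTriple l = false := by simpa using h
    rw [h']
    simp only [Bool.not_false]
    rw [List.all_eq_true]
    intro c _
    by_contra hcon
    have : pvIsSub [c, c, c] l = true := by
      cases hv : pvIsSub [c, c, c] l with
      | true => rfl
      | false => exact absurd (by simp [hv]) hcon
    rw [pvTriple_of_isSub c l this] at h'
    exact absurd h' (by simp)

-- ===== VERDICT (by name: the statement is the Claim_ definition above) =====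
theorem maximum_two_spec : Claim_equal_maximum_two := by
  intro line _
  show maximum_two line = maximum_two_alt line
  unfold maximum_two maximum_two_alt
  rw [pvAlt_char]
  cases hl : line.toList with
  | nil => simp [pvGoA, pvHasTriple]
  | cons x t =>
    have : pvGoA (x :: t) none 0 = pvGoA t (some x) 1 := by simp [pvGoA]
    rw [this, (pvGoA_char t x).1]
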